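-- pv_equiv track=rewrite | github.com/SAG145/Project-Euler | PEP371 - Licence Plates.py | num_of_wins_sim
-- ===== SOURCE A (Python) =====
-- from math import comb
--
-- def num_of_wins_sim(l):
--     m = min(499, l)
--     s = 0
--     lst = [0] * (m + 1)
--     for i in range(m, 0, -1):
--         a = comb(499,i)*2**i*i**l
--         d = 1 - lst[i]
--         s += a*d
--         for j in range(1,i):
--             lst[j] += d*comb(499 - j, i - j)*2**(i - j)
--     return 998**l - s
-- ===== SOURCE B (Python) =====
-- from math import comb
--
-- def num_of_wins_sim(l):
--     # Closed form: invert the triangular system analytically (binomial inversion),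
--     # giving the number of losing outcomes as a direct inclusion-exclusion sum of
--     # surjection counts: s = sum_t C(499,t)*2^t*Surj(l,t); no DP array, no recurrence.
--     m = min(499, l)
--     pw = [i ** l for i in range(m + 1)]
--     s = 0
--     for t in range(1, m + 1):
--         surj = sum((-1) ** (t - i) * comb(t, i) * pw[i] for i in range(1, t + 1))
--         s += comb(499, t) * 2 ** t * surj
--     return 998 ** l - s
-- ===== Notes on version B (the rewrite author's own statement) =====
-- stated objective: alternative
-- what changed: Replaced A's quadratic scatter-update DP (an lst array into which each outer step pushes correction terms for all smaller indices) by the analytic solution of that triangular system via binomial inversion: the losing-outcome count is computed directly as sum over t of comb(499,t)*2**t*Surj(l,t) with the surjection count Surj(l,t) given by its inclusion-exclusion formula; no update array and no recurrence remain.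
-- outside the precondition, e.g. on num_of_wins_sim(-1): A returns 0.001002004008016032, B returns 0.001002004008016032
import Mathlib
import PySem

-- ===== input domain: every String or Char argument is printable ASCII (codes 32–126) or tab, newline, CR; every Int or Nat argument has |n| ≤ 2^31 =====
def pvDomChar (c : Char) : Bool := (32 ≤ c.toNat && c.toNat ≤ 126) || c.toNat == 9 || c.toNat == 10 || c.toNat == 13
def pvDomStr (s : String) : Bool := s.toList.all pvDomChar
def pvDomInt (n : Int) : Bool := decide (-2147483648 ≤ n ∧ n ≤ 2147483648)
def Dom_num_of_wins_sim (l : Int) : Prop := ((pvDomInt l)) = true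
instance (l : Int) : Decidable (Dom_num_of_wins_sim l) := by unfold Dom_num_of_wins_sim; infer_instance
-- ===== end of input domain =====

-- B replaces A's quadratic scatter-update DP by a closed-form inclusion-exclusion sum of
-- surjection counts obtained by binomial inversion of A's triangular system (alternative algorithm, similar cost).

-- math.comb and A's inner coefficient comb(499-j, i-j)*2**(i-j)
def pvCombZ (n k : Int) : Int := ((n.toNat.descFactorial k.toNat) / (k.toNat.factorial) : ℕ)
def pvCo (j i : Int) : Int := pvCombZ (499 - j) (i - j) * 2 ^ (i - j).toNat

-- ===== PORT A =====
-- inner loop body: lst[j] += d*comb(499-j, i-j)*2**(i-j)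
def aInnerStep (d i : Int) (lst : List Int) (j : Int) : List Int :=
  lst.set j.toNat (lst.getD j.toNat 0 + d * pvCo j i)

-- for j in range(1, i): ...
def aInner (d i : Int) (lst : List Int) : List Int :=
  (PySem.List.pyRange 1 i 1).foldl (aInnerStep d i) lst

-- one outer iteration: a = comb(499,i)*2**i*i**l; d = 1 - lst[i]; s += a*d; inner loop
def aStep (l : Int) (st : Int × List Int) (i : Int) : Int × List Int :=
  let a := pvCombZ 499 i * 2 ^ i.toNat * i ^ l.toNat
  let d := 1 - st.2.getD i.toNat 0
  (st.1 + a * d, aInner d i st.2)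

def num_of_wins_sim (l : Int) : Int :=
  let m := min 499 l
  let res := (PySem.List.pyRange m 0 (-1)).foldl (aStep l) (0, List.replicate (m + 1).toNat 0)
  998 ^ l.toNat - res.1

-- ===== PORT B =====
-- surj = sum((-1)**(t-i)*comb(t,i)*pw[i] for i in range(1, t+1))
-- (pw[i] is always in range here, so the total pyGetD stands for Python's pw[i])
def bSurj (l : Int) (pw : List Int) (t : Int) : Int :=
  ((PySem.List.pyRange 1 (t + 1) 1).map
    (fun i => (-1) ^ (t - i).toNat * pvCombZ t i * PySem.List.pyGetD pw i 0)).sum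

-- s += comb(499,t)*2**t*surj
def bStep (l : Int) (pw : List Int) (s t : Int) : Int :=
  s + pvCombZ 499 t * 2 ^ t.toNat * bSurj l pw t

def num_of_wins_sim_alt (l : Int) : Int :=
  let m := min 499 l
  let pw := (PySem.List.pyRange 0 (m + 1) 1).map (fun i => i ^ l.toNat)
  let s := (PySem.List.pyRange 1 (m + 1) 1).foldl (bStep l pw) 0
  998 ^ l.toNat - s

-- ===== PRECONDITION & SPEC =====
-- Pre_ excludes negative l, on which A's 998**l (and B's too) is a float, not an int.
def Pre_num_of_wins_sim (l : Int) : Prop := 0 ≤ l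
instance (l : Int) : Decidable (Pre_num_of_wins_sim l) := by unfold Pre_num_of_wins_sim; infer_instance
def pvWitness_num_of_wins_sim : Int := (3)

def Spec_num_of_wins_sim (l : Int) (out : Int) : Prop := out = num_of_wins_sim_alt l
instance (l : Int) (out : Int) : Decidable (Spec_num_of_wins_sim l out) := by unfold Spec_num_of_wins_sim; infer_instance

-- ===== CLAIM (what is proved, stated in full; the proofs are below) =====
def Claim_equal_num_of_wins_sim : Prop := ∀ (l : Int), Dom_num_of_wins_sim l → Pre_num_of_wins_sim l → Spec_num_of_wins_sim l (num_of_wins_sim l)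

-- ===== LEMMAS AND PROOFS =====

lemma pvCombZ_def (n k : Int) : pvCombZ n k = (Nat.choose n.toNat k.toNat : Int) := by
  unfold pvCombZ
  rw [Nat.choose_eq_descFactorial_div_factorial]

-- the triangular recurrence A's array update implements:
-- D i = 1 - Σ_{t=i+1}^{n} D t * C(499-i, t-i) * 2^(t-i)
def pvD (n : ℕ) (i : ℕ) : Int :=
  1 - ∑ t ∈ (Finset.Ico (i + 1) (n + 1)).attach, pvD n t.1 * pvCo (↑i) (↑t.1)
termination_by n + 1 - i
decreasing_by
  have := Finset.mem_Ico.mp t.2; omega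

lemma pvD_eq (n i : ℕ) :
    pvD n i = 1 - ∑ t ∈ Finset.Ico (i + 1) (n + 1), pvD n t * pvCo (↑i) (↑t) := by
  rw [pvD]
  congr 1
  exact Finset.sum_attach (Finset.Ico (i + 1) (n + 1)) (fun t => pvD n t * pvCo (↑i) (↑t))

lemma getD_set_self (l : List Int) (i : ℕ) (a : Int) (h : i < l.length) :
    (l.set i a).getD i 0 = a := by
  rw [List.getD_eq_getElem?_getD, List.getElem?_set_self h]; rfl

lemma getD_set_ne (l : List Int) (i j : ℕ) (a : Int) (h : i ≠ j) :
    (l.set i a).getD j 0 = l.getD j 0 := by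
  rw [List.getD_eq_getElem?_getD, List.getElem?_set_ne h, ← List.getD_eq_getElem?_getD]

-- A's outer coefficient a = comb(499,t)*2**t*t**l
def aCoef (l : Int) (t : ℕ) : Int := pvCombZ 499 (↑t) * 2 ^ t * (↑t : Int) ^ l.toNat

lemma list_sum_range (g : ℕ → Int) (c : ℕ) :
    ((List.range c).map g).sum = ∑ q ∈ Finset.range c, g q := by
  induction c with
  | zero => simp
  | succ c ih => simp [List.range_succ, Finset.sum_range_succ, ih]

lemma pyRange_map_sum_one (b : ℕ) (f : Int → Int) :
    ((PySem.List.pyRange 1 (↑b) 1).map f).sum = ∑ t ∈ Finset.Ico 1 b, f (↑t) := by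
  rw [PySem.List.pyRange_one, List.map_map, list_sum_range, Finset.sum_Ico_eq_sum_range]
  have hc : (((b : Int)) - 1).toNat = b - 1 := by omega
  rw [hc]
  refine Finset.sum_congr rfl (fun q _ => ?_)
  simp only [Function.comp_apply]
  congr 1

lemma foldl_innerStep_length (d i : Int) (L : List Int) (lst : List Int) :
    (L.foldl (aInnerStep d i) lst).length = lst.length := by
  induction L generalizing lst with
  | nil => rfl
  | cons x L ih => simp [List.foldl_cons, ih, aInnerStep]

lemma inner_fold_getD (d i : Int) (c : ℕ) (lst : List Int) (j : ℕ) :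
    (((PySem.List.pyRange 1 (↑c) 1).foldl (aInnerStep d i) lst).getD j 0)
      = if 1 ≤ j ∧ j < c ∧ j < lst.length
        then lst.getD j 0 + d * pvCo (↑j) i else lst.getD j 0 := by
  induction c with
  | zero =>
      rw [PySem.List.pyRange_one_eq_nil (by norm_num)]
      rw [if_neg (by omega)]; rfl
  | succ c ih =>
      by_cases hc : 1 ≤ c
      · have hsplit : PySem.List.pyRange 1 (↑(c + 1)) 1
            = PySem.List.pyRange 1 (↑c) 1 ++ [(↑c : Int)] := by
          have h := PySem.List.pyRange_one_succ_right (a := 1) (b := (↑c : Int)) (by exact_mod_cast hc)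
          rw [← h]; norm_num
        rw [hsplit, List.foldl_append]
        have hlen : ((PySem.List.pyRange 1 (↑c) 1).foldl (aInnerStep d i) lst).length
            = lst.length := foldl_innerStep_length d i _ lst
        simp only [List.foldl_cons, List.foldl_nil, aInnerStep, Int.toNat_natCast]
        by_cases hj : j = c
        · subst hj
          by_cases hin : j < lst.length
          · rw [getD_set_self _ _ _ (by omega), ih, if_neg (by omega),
              if_pos ⟨hc, by omega, hin⟩]
          · rw [List.set_eq_of_length_le (by omega), ih, if_neg (by omega),
              if_neg (by omega)]
        · rw [getD_set_ne _ _ _ _ (fun hcj => hj hcj.symm), ih]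
          by_cases h1 : 1 ≤ j ∧ j < c ∧ j < lst.length
          · rw [if_pos h1, if_pos (by omega)]
          · rw [if_neg h1, if_neg (by omega)]
      · have h0 : c = 0 := by omega
        subst h0
        rw [PySem.List.pyRange_one_eq_nil (by norm_num)]
        rw [if_neg (by omega)]; rfl

-- A's loop invariant: after processing i = n, …, k+1
def AInv (l : Int) (n k : ℕ) (st : Int × List Int) : Prop :=
  st.2.length = n + 1 ∧
  st.1 = ∑ t ∈ Finset.Ico (k + 1) (n + 1), aCoef l t * pvD n t ∧
  ∀ j : ℕ, 1 ≤ j → j ≤ k →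
    st.2.getD j 0 = ∑ t ∈ Finset.Ico (k + 1) (n + 1), pvD n t * pvCo (↑j) (↑t)

lemma aStep_inv (l : Int) (n k : ℕ) (st : Int × List Int)
    (hk1 : 1 ≤ k) (hkn : k ≤ n) (h : AInv l n k st) :
    AInv l n (k - 1) (aStep l st (↑k)) := by
  obtain ⟨hlen, hs, hlst⟩ := h
  have hd : 1 - st.2.getD ((↑k : Int)).toNat 0 = pvD n k := by
    rw [Int.toNat_natCast, hlst k hk1 le_rfl, pvD_eq]
  have hk1' : k - 1 + 1 = k := by omega
  refine ⟨?_, ?_, ?_⟩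
  · simp only [aStep]
    rw [aInner, foldl_innerStep_length, hlen]
  · simp only [aStep]
    rw [hd, hs, hk1',
      Finset.sum_eq_sum_Ico_succ_bot (show k < n + 1 by omega) (fun t => aCoef l t * pvD n t)]
    simp only [aCoef, Int.toNat_natCast]
    ring
  · intro j hj1 hj2
    simp only [aStep]
    rw [aInner, hd, inner_fold_getD,
      if_pos (by refine ⟨hj1, by omega, by omega⟩),
      hlst j hj1 (by omega), hk1',
      Finset.sum_eq_sum_Ico_succ_bot (show k < n + 1 by omega) (fun t => pvD n t * pvCo (↑j) (↑t))]
    ring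

lemma a_fold (l : Int) (n : ℕ) (k : ℕ) (hk : k ≤ n) (st : Int × List Int)
    (h : AInv l n k st) :
    AInv l n 0 ((PySem.List.pyRange (↑k) 0 (-1)).foldl (aStep l) st) := by
  induction k generalizing st with
  | zero =>
      rw [PySem.List.pyRange_neg_one_eq_nil (by norm_num)]
      simpa using h
  | succ k ih =>
      rw [PySem.List.pyRange_neg_one_cons (by exact_mod_cast Nat.succ_pos k), List.foldl_cons]
      have hc : ((↑(k + 1) : Int)) - 1 = ↑k := by push_cast; ring
      rw [hc]
      exact ih (by omega) _ (by simpa using aStep_inv l n (k + 1) st (by omega) hk h)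

-- ===== the binomial-inversion closed form that B rests on =====

-- the analytic solution of the triangular system: cD n i = Σ_{t=i}^{n} (-2)^(t-i) C(499-i, t-i)
def sCoef (t i : ℕ) : Int := (-2 : Int) ^ (t - i) * (Nat.choose (499 - i) (t - i) : Int)

def cD (n i : ℕ) : Int := ∑ t ∈ Finset.Ico i (n + 1), sCoef t i

lemma pvCo_nat (j i : ℕ) (h1 : j ≤ i) (h2 : j ≤ 499) :
    pvCo (↑j) (↑i) = (Nat.choose (499 - j) (i - j) : Int) * 2 ^ (i - j) := by
  unfold pvCo
  simp only [pvCombZ_def]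
  have e1 : ((499 : Int) - ↑j).toNat = 499 - j := by omega
  have e2 : ((↑i : Int) - ↑j).toNat = i - j := by omega
  rw [e1, e2]

lemma neg_one_pow_sub_int (u k : ℕ) (h : u ≤ k) :
    (-1 : Int) ^ (k - u) = (-1) ^ k * (-1) ^ u := by
  have h1 : (-1 : Int) ^ k = (-1) ^ u * (-1) ^ (k - u) := by
    rw [← pow_add]; congr 1; omega
  have h2 : ((-1 : Int) ^ u) * ((-1 : Int) ^ u) = 1 := by
    rw [← pow_add]
    exact Even.neg_one_pow ⟨u, rfl⟩
  calc (-1 : Int) ^ (k - u) = ((-1) ^ u * (-1) ^ u) * (-1) ^ (k - u) := by rw [h2, one_mul]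
    _ = (-1) ^ u * ((-1) ^ u * (-1) ^ (k - u)) := by ring
    _ = (-1) ^ k * (-1) ^ u := by rw [← h1]; ring

-- one entry of M * cD: Σ_{t=i}^{s} C(499-i,t-i) 2^(t-i) (-2)^(s-t) C(499-t,s-t) = δ_{s,i}
lemma inv_entry (i s : ℕ) (his : i ≤ s) :
    ∑ t ∈ Finset.Ico i (s + 1),
        (Nat.choose (499 - i) (t - i) : Int) * 2 ^ (t - i) * sCoef s t
      = if s = i then 1 else 0 := by
  rw [Finset.sum_Ico_eq_sum_range]
  have hc : s + 1 - i = (s - i) + 1 := by omega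
  rw [hc]
  set k := s - i with hk
  have hterm : ∀ u ∈ Finset.range (k + 1),
      (Nat.choose (499 - i) ((i + u) - i) : Int) * 2 ^ ((i + u) - i) * sCoef s (i + u)
        = ((Nat.choose (499 - i) k : Int) * 2 ^ k * (-1) ^ k) * ((-1) ^ u * (Nat.choose k u : Int)) := by
    intro u hu
    have huk : u ≤ k := by have := Finset.mem_range.mp hu; omega
    have e1 : (i + u) - i = u := by omega
    have e2 : s - (i + u) = k - u := by omega
    have e3 : 499 - (i + u) = (499 - i) - u := by omega
    unfold sCoef
    rw [e1, e2, e3]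
    have hch : (Nat.choose (499 - i) u : Int) * (Nat.choose ((499 - i) - u) (k - u) : Int)
        = (Nat.choose (499 - i) k : Int) * (Nat.choose k u : Int) := by
      have := Nat.choose_mul (n := 499 - i) (k := k) (s := u) huk
      exact_mod_cast this.symm
    have hpow : ((-2 : Int)) ^ (k - u) = (-1) ^ k * (-1) ^ u * 2 ^ (k - u) := by
      rw [show ((-2 : Int)) = (-1) * 2 by norm_num, mul_pow, neg_one_pow_sub_int u k huk]
    rw [hpow]
    have h2 : (2 : Int) ^ u * 2 ^ (k - u) = 2 ^ k := by
      rw [← pow_add]; congr 1; omega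
    calc (Nat.choose (499 - i) u : Int) * 2 ^ u * ((-1) ^ k * (-1) ^ u * 2 ^ (k - u) * (Nat.choose ((499 - i) - u) (k - u) : Int))
        = ((Nat.choose (499 - i) u : Int) * (Nat.choose ((499 - i) - u) (k - u) : Int)) * (2 ^ u * 2 ^ (k - u)) * ((-1) ^ k * (-1) ^ u) := by ring
      _ = ((Nat.choose (499 - i) k : Int) * (Nat.choose k u : Int)) * 2 ^ k * ((-1) ^ k * (-1) ^ u) := by rw [hch, h2]
      _ = ((Nat.choose (499 - i) k : Int) * 2 ^ k * (-1) ^ k) * ((-1) ^ u * (Nat.choose k u : Int)) := by ring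
  rw [Finset.sum_congr rfl hterm, ← Finset.mul_sum,
    Int.alternating_sum_range_choose]
  by_cases hk0 : k = 0
  · rw [if_pos hk0, if_pos (show s = i by omega)]
    simp [hk0]
  · rw [if_neg hk0, if_neg (show ¬ s = i by omega), mul_zero]

-- row i of the inversion: Σ_{t=i}^{n} C(499-i,t-i) 2^(t-i) cD n t = 1
lemma row_sum (n i : ℕ) (hin : i ≤ n) :
    ∑ t ∈ Finset.Ico i (n + 1),
        (Nat.choose (499 - i) (t - i) : Int) * 2 ^ (t - i) * cD n t = 1 := by
  unfold cD
  simp_rw [Finset.mul_sum]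
  rw [Finset.sum_Ico_Ico_comm i (n + 1)
    (fun t s => (Nat.choose (499 - i) (t - i) : Int) * 2 ^ (t - i) * sCoef s t)]
  have hterm : ∀ s ∈ Finset.Ico i (n + 1),
      (∑ t ∈ Finset.Ico i (s + 1),
        (Nat.choose (499 - i) (t - i) : Int) * 2 ^ (t - i) * sCoef s t)
      = if s = i then 1 else 0 := by
    intro s hs
    exact inv_entry i s (Finset.mem_Ico.mp hs).1
  rw [Finset.sum_congr rfl hterm,
    Finset.sum_ite_eq' (Finset.Ico i (n + 1)) i (fun _ => (1 : Int)),
    if_pos (Finset.mem_Ico.mpr ⟨le_rfl, by omega⟩)]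

-- the DP values equal the closed form
lemma pvD_closed (n : ℕ) (hn : n ≤ 499) :
    ∀ k i, n ≤ i + k → i ≤ n → pvD n i = cD n i := by
  intro k
  induction k with
  | zero =>
      intro i h1 h2
      have hie : i = n := by omega
      subst hie
      rw [pvD_eq]
      rw [show Finset.Ico (i + 1) (i + 1) = ∅ by simp]
      unfold cD
      rw [show Finset.Ico i (i + 1) = {i} from by ext x; simp [Nat.le_antisymm_iff, and_comm]]
      simp [sCoef]
  | succ k ih =>
      intro i h1 h2
      by_cases hik : n ≤ i + k
      · exact ih i hik h2
      · have hlt : i < n := by omega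
        rw [pvD_eq]
        have hterm : ∀ t ∈ Finset.Ico (i + 1) (n + 1),
            pvD n t * pvCo (↑i) (↑t)
              = (Nat.choose (499 - i) (t - i) : Int) * 2 ^ (t - i) * cD n t := by
          intro t ht
          have htm := Finset.mem_Ico.mp ht
          rw [ih t (by omega) (by omega), pvCo_nat i t (by omega) (by omega)]
          ring
        rw [Finset.sum_congr rfl hterm]
        have hrow := row_sum n i (le_of_lt hlt)
        rw [Finset.sum_eq_sum_Ico_succ_bot (show i < n + 1 by omega)
          (fun t => (Nat.choose (499 - i) (t - i) : Int) * 2 ^ (t - i) * cD n t)] at hrow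
        have hbot : (Nat.choose (499 - i) (i - i) : Int) * 2 ^ (i - i) * cD n i = cD n i := by
          simp
        rw [hbot] at hrow
        linarith

-- the double-sum swap: A's answer sum equals B's surjection-count sum
lemma mainEq (l : Int) (n : ℕ) (hn : n ≤ 499) :
    ∑ i ∈ Finset.Ico 1 (n + 1), aCoef l i * pvD n i
      = ∑ t ∈ Finset.Ico 1 (n + 1), (Nat.choose 499 t : Int) * 2 ^ t *
          (∑ i ∈ Finset.Ico 1 (t + 1), (-1 : Int) ^ (t - i) * (Nat.choose t i : Int) * (↑i : Int) ^ l.toNat) := by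
  have h1 : ∀ i ∈ Finset.Ico 1 (n + 1), aCoef l i * pvD n i
      = ∑ t ∈ Finset.Ico i (n + 1), aCoef l i * sCoef t i := by
    intro i hi
    have him := Finset.mem_Ico.mp hi
    rw [pvD_closed n hn (n - i) i (by omega) (by omega)]
    unfold cD
    rw [Finset.mul_sum]
  rw [Finset.sum_congr rfl h1,
    Finset.sum_Ico_Ico_comm 1 (n + 1) (fun i t => aCoef l i * sCoef t i)]
  refine Finset.sum_congr rfl (fun t ht => ?_)
  have htm := Finset.mem_Ico.mp ht
  rw [Finset.mul_sum]
  refine Finset.sum_congr rfl (fun i hi => ?_)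
  have him := Finset.mem_Ico.mp hi
  have hit : i ≤ t := by omega
  unfold aCoef sCoef
  simp only [pvCombZ_def]
  have e1 : ((499 : Int)).toNat = 499 := by decide
  have e2 : ((↑i : Int)).toNat = i := by omega
  rw [e1, e2]
  have hch : (Nat.choose 499 i : Int) * (Nat.choose (499 - i) (t - i) : Int)
      = (Nat.choose 499 t : Int) * (Nat.choose t i : Int) := by
    have := Nat.choose_mul (n := 499) (k := t) (s := i) hit
    exact_mod_cast this.symm
  have hpow : ((-2 : Int)) ^ (t - i) = (-1) ^ (t - i) * 2 ^ (t - i) := by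
    rw [show ((-2 : Int)) = (-1) * 2 by norm_num, mul_pow]
  have h2 : (2 : Int) ^ i * 2 ^ (t - i) = 2 ^ t := by
    rw [← pow_add]; congr 1; omega
  calc (Nat.choose 499 i : Int) * 2 ^ i * (↑i : Int) ^ l.toNat * ((-2) ^ (t - i) * (Nat.choose (499 - i) (t - i) : Int))
      = ((Nat.choose 499 i : Int) * (Nat.choose (499 - i) (t - i) : Int)) * (2 ^ i * 2 ^ (t - i)) * ((-1) ^ (t - i) * (↑i : Int) ^ l.toNat) := by rw [hpow]; ring
    _ = ((Nat.choose 499 t : Int) * (Nat.choose t i : Int)) * 2 ^ t * ((-1) ^ (t - i) * (↑i : Int) ^ l.toNat) := by rw [hch, h2]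
    _ = (Nat.choose 499 t : Int) * 2 ^ t * ((-1) ^ (t - i) * (Nat.choose t i : Int) * (↑i : Int) ^ l.toNat) := by ring

-- B's inner comprehension as a Finset sum
lemma bSurj_eq (l : Int) (mq t : ℕ) (htm : t ≤ mq) :
    bSurj l ((PySem.List.pyRange 0 (↑(mq + 1)) 1).map (fun i => i ^ l.toNat)) (↑t)
      = ∑ i ∈ Finset.Ico 1 (t + 1), (-1 : Int) ^ (t - i) * (Nat.choose t i : Int) * (↑i : Int) ^ l.toNat := by
  unfold bSurj
  simp only [pvCombZ_def]
  have hc : ((↑t : Int)) + 1 = ↑(t + 1) := by push_cast; ring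
  rw [hc, pyRange_map_sum_one (t + 1)]
  refine Finset.sum_congr rfl (fun i hi => ?_)
  have him := Finset.mem_Ico.mp hi
  have e1 : ((↑t : Int) - ↑i).toNat = t - i := by omega
  have e2 : ((↑t : Int)).toNat = t := by omega
  have e3 : ((↑i : Int)).toNat = i := by omega
  rw [PySem.List.pyGetD_map_pyRange_of_nonneg (fun i => i ^ l.toNat) (↑(mq + 1)) (↑i) 0
    (by omega) (by exact_mod_cast (by omega : (i : Int) < ↑(mq + 1)))]
  rw [e1, e2, e3]

-- ===== VERDICT (by name: the statement is the Claim_ definition above) =====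
theorem num_of_wins_sim_spec : Claim_equal_num_of_wins_sim := by
  intro l _ hl
  unfold Spec_num_of_wins_sim num_of_wins_sim num_of_wins_sim_alt
  have h0 : (0 : Int) ≤ min 499 l := le_min (by norm_num) hl
  obtain ⟨n, hm⟩ : ∃ n : ℕ, min 499 l = (n : Int) := ⟨_, (Int.toNat_of_nonneg h0).symm⟩
  have hn : n ≤ 499 := by
    have : min 499 l ≤ 499 := min_le_left _ _
    omega
  rw [hm]
  have hrep : (((n : Int)) + 1).toNat = n + 1 := by omega
  show 998 ^ l.toNat
      - ((PySem.List.pyRange (↑n) 0 (-1)).foldl (aStep l)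
          (0, List.replicate (((n : Int)) + 1).toNat 0)).1
    = 998 ^ l.toNat
      - (PySem.List.pyRange 1 (((n : Int)) + 1) 1).foldl
          (bStep l ((PySem.List.pyRange 0 (((n : Int)) + 1) 1).map (fun i => i ^ l.toNat))) 0
  rw [hrep]
  have hA : AInv l n 0
      ((PySem.List.pyRange (↑n) 0 (-1)).foldl (aStep l) (0, List.replicate (n + 1) 0)) := by
    refine a_fold l n n le_rfl _ ⟨by simp, by simp, fun j hj1 hj2 => ?_⟩
    simp
  obtain ⟨_, hAs, _⟩ := hA
  norm_num at hAs
  rw [hAs]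
  congr 1
  have hc : ((n : Int)) + 1 = ↑(n + 1) := by push_cast; ring
  rw [hc]
  have hb : bStep l ((PySem.List.pyRange 0 (↑(n + 1)) 1).map (fun i => i ^ l.toNat))
      = fun s t => s + pvCombZ 499 t * 2 ^ t.toNat *
          bSurj l ((PySem.List.pyRange 0 (↑(n + 1)) 1).map (fun i => i ^ l.toNat)) t := rfl
  rw [hb, PySem.List.foldl_add, zero_add]
  rw [pyRange_map_sum_one (n + 1)]
  rw [mainEq l n hn]
  refine Finset.sum_congr rfl (fun t ht => ?_)
  have htm := Finset.mem_Ico.mp ht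
  rw [bSurj_eq l n t (by omega)]
  simp only [pvCombZ_def]
  have e1 : ((499 : Int)).toNat = 499 := by decide
  have e2 : ((↑t : Int)).toNat = t := by omega
  rw [e1, e2]
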